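-- pv_equiv track=rewrite | github.com/renatoseb/Proyecto-Final | Funciones.py | filascolumnas
-- ===== SOURCE A (Python) =====
-- def filascolumnas(n): # n = una matriz, esta funcion para retornar el numero de filas y columnas
--   fiyco=[] # lista vacía
--   fila=0
--   columna=0
--   for i in n:
--     fila+=1 # se cuenta los elementos, que son las filas
--     columna=len(i) # como las listas dentre de la lista grande tienen igual numero de elementos, la columna no varía
--   fiyco.append(fila)
--   fiyco.append(columna)
--   return fiyco  # retorna las filas y columnas de una matriz (en una lista)
-- ===== SOURCE B (Python) =====
-- def filascolumnas(n):
--     return [len(n), len(n[-1]) if n else 0]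
-- ===== Notes on version B (the rewrite author's own statement) =====
-- stated objective: simpler
-- what changed: Replaces the counting loop (row counter plus column overwrite per row) with a direct closed form: [len(n), len(n[-1]) if n else 0].
import Mathlib
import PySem

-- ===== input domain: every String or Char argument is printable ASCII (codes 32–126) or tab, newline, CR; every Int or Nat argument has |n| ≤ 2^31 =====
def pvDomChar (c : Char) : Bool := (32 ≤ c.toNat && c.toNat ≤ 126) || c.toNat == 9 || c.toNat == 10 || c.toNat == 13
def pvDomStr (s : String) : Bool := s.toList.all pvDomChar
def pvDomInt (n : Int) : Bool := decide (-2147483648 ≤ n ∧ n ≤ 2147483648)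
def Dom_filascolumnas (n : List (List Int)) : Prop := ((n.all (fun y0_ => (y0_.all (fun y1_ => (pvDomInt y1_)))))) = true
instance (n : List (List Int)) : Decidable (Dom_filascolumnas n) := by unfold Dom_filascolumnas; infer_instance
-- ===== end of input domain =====

-- ===== PORT A =====
-- A: counts rows in a loop and overwrites the column count with len of each row.
def filascolumnas (n : List (List Int)) : List Int :=
  let s := n.foldl (fun (st : Int × Int) i => (st.1 + 1, (i.length : Int))) (0, 0)
  [s.1, s.2]

-- ===== PORT B =====
-- B (closed form): [len(n), len(n[-1]) if n else 0]
def filascolumnas_alt (n : List (List Int)) : List Int :=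
  [(n.length : Int), if n.isEmpty then 0 else ((n.getLast?.getD []).length : Int)]

-- ===== PRECONDITION & SPEC =====
def Spec_filascolumnas (n : List (List Int)) (out : List Int) : Prop := out = filascolumnas_alt n
instance (n : List (List Int)) (out : List Int) : Decidable (Spec_filascolumnas n out) := by unfold Spec_filascolumnas; infer_instance

-- ===== CLAIM (what is proved, stated in full; the proofs are below) =====
def Claim_equal_filascolumnas : Prop := ∀ (n : List (List Int)), Dom_filascolumnas n → Spec_filascolumnas n (filascolumnas n)

-- ===== LEMMAS AND PROOFS =====

-- ===== VERDICT (by name: the statement is the Claim_ definition above) =====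
theorem pv_fold (n : List (List Int)) (a : Int) (c : Int) :
    n.foldl (fun (st : Int × Int) i => (st.1 + 1, (i.length : Int))) (a, c)
      = (a + n.length, if n.isEmpty then c else ((n.getLast?.getD []).length : Int)) := by
  induction n generalizing a c with
  | nil => simp
  | cons h t ih =>
    simp [List.foldl, ih]
    cases t with
    | nil => simp
    | cons h2 t2 =>
      simp only [List.getLast?_cons_cons]
      constructor <;> [omega; rfl]

theorem filascolumnas_spec : Claim_equal_filascolumnas := by
  intro n _
  unfold Spec_filascolumnas filascolumnas filascolumnas_alt
  simp [pv_fold]
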